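-- pv_equiv track=rewrite | github.com/Jacques7103/Comp_Tech | main.py | keyword
-- ===== SOURCE A (Python) =====
-- def keyword(file):
--     key_list = []
--     file = file.split()
--     for word in file:
--         words = ''.join(filter(str.isalpha, word))
--         if word[0] == "i":
--             if word[1] == "n":
--                 if word[2] == "t" and words[-1] == "t":
--                     key_list.append("int")
--         elif word[0] == "f":
--             if word[1] == "l":
--                 if word[2] == "o":
--                     if word[3] == "a":
--                         if word[4] == "t" and words[-1] == "t":
--                             key_list.append("float")
--         elif word[0] == "w":
--             if word[1] == "h":
--                 if word[2] == "i":
--                     if word[3] == "l":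
--                         if word[4] == "e" and words[-1] == "e":
--                             key_list.append("while")
--         elif word[0] == "m":
--             if word[1] == "a":
--                 if word[2] == "i":
--                     if word[3] == "n" and words[-1] == "n":
--                         key_list.append("main")
--         elif word[0] == "c":
--             if word[1] == "o":
--                 if word[2] == "n":
--                     if word[3] == "s":
--                         if word[4] == "t" and words[-1] == "t":
--                             key_list.append("const")
--     return key_list
-- ===== SOURCE B (Python) =====
-- def keyword(file):
--     keys = ["int", "float", "while", "main", "const"]
--     out = []
--     for word in file.split():
--         letters = ''.join(c for c in word if c.isalpha())
--         for kw in keys: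
--             if word.startswith(kw) and letters[-1] == kw[-1]:
--                 out.append(kw)
--     return out
-- ===== Notes on version B (the rewrite author's own statement) =====
-- stated objective: simpler
-- what changed: Replaces the five hand-unrolled nested-if branch chains with a single data-driven loop over a keyword table, testing each whitespace-split word with startswith plus a last-alpha-letter check.
import Mathlib
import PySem

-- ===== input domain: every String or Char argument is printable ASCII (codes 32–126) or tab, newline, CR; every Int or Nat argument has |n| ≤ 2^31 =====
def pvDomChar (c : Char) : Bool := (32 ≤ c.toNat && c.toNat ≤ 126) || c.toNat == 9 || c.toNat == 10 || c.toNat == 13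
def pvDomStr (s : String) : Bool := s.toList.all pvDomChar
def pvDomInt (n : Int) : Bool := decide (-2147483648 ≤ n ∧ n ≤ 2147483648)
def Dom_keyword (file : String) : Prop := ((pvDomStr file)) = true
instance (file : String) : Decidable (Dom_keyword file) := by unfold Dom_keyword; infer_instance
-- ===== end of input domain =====

-- B replaces A's five hand-unrolled nested-if branch chains by one data-driven loop
-- over a keyword table (startswith + last-alpha-letter check): simpler, same cost.

-- ===== PORT A =====
-- the body of A's 'for word in file' loop, over word's code points
-- (word[i] = pyGet?; 'words' = ''.join(filter(str.isalpha, word)) as its character list)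
def keywordCharsA (acc : List String) (l : List Char) : List String :=
  let words := l.filter PySem.Chars.isalpha
  if PySem.List.pyGet? l 0 = some 'i' then
    if PySem.List.pyGet? l 1 = some 'n' then
      if PySem.List.pyGet? l 2 = some 't' ∧ PySem.List.pyGet? words (-1) = some 't' then
        acc ++ ["int"]
      else acc
    else acc
  else if PySem.List.pyGet? l 0 = some 'f' then
    if PySem.List.pyGet? l 1 = some 'l' then
      if PySem.List.pyGet? l 2 = some 'o' then
        if PySem.List.pyGet? l 3 = some 'a' then
          if PySem.List.pyGet? l 4 = some 't' ∧ PySem.List.pyGet? words (-1) = some 't' then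
            acc ++ ["float"]
          else acc
        else acc
      else acc
    else acc
  else if PySem.List.pyGet? l 0 = some 'w' then
    if PySem.List.pyGet? l 1 = some 'h' then
      if PySem.List.pyGet? l 2 = some 'i' then
        if PySem.List.pyGet? l 3 = some 'l' then
          if PySem.List.pyGet? l 4 = some 'e' ∧ PySem.List.pyGet? words (-1) = some 'e' then
            acc ++ ["while"]
          else acc
        else acc
      else acc
    else acc
  else if PySem.List.pyGet? l 0 = some 'm' then
    if PySem.List.pyGet? l 1 = some 'a' then
      if PySem.List.pyGet? l 2 = some 'i' then
        if PySem.List.pyGet? l 3 = some 'n' ∧ PySem.List.pyGet? words (-1) = some 'n' then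
          acc ++ ["main"]
        else acc
      else acc
    else acc
  else if PySem.List.pyGet? l 0 = some 'c' then
    if PySem.List.pyGet? l 1 = some 'o' then
      if PySem.List.pyGet? l 2 = some 'n' then
        if PySem.List.pyGet? l 3 = some 's' then
          if PySem.List.pyGet? l 4 = some 't' ∧ PySem.List.pyGet? words (-1) = some 't' then
            acc ++ ["const"]
          else acc
        else acc
      else acc
    else acc
  else acc

def keyword (file : String) : List String :=
  (PySem.Str.split₀ file).foldl (fun acc word => keywordCharsA acc word.toList) []

-- ===== PORT B =====
def pvKeys : List String := ["int", "float", "while", "main", "const"]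

-- the body of B's outer loop: the inner 'for kw in keys: if …: out.append(kw)' is the filter
def keywordCharsB (acc : List String) (l : List Char) : List String :=
  let letters := l.filter PySem.Chars.isalpha
  acc ++ pvKeys.filter (fun kw =>
    PySem.Chars.startswith l kw.toList &&
    (PySem.List.pyGet? letters (-1) == PySem.List.pyGet? kw.toList (-1)))

def keyword_alt (file : String) : List String :=
  (PySem.Str.split₀ file).foldl (fun acc word => keywordCharsB acc word.toList) []

-- ===== PRECONDITION & SPEC =====
-- the nonempty proper prefixes of the five keywords
def pvProperPrefixes : List String :=
  ["i", "in", "f", "fl", "flo", "floa", "w", "wh", "whi", "whil", "m", "ma", "mai", "c", "co", "con", "cons"]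

-- Pre_ excludes exactly the inputs on which the Python A raises IndexError: those where some
-- whitespace-split word is a nonempty proper prefix of one of the five keywords.
def Pre_keyword (file : String) : Prop :=
  ∀ w ∈ PySem.Str.split₀ file, w ∉ pvProperPrefixes
instance (file : String) : Decidable (Pre_keyword file) := by unfold Pre_keyword; infer_instance

def pvWitness_keyword : String := "int x float5 whilee mai2n const"

def Spec_keyword (file : String) (out : List String) : Prop := out = keyword_alt file
instance (file : String) (out : List String) : Decidable (Spec_keyword file out) := by unfold Spec_keyword; infer_instance

-- ===== CLAIM (what is proved, stated in full; the proofs are below) =====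
def Claim_equal_keyword : Prop := ∀ (file : String), Dom_keyword file → Pre_keyword file → Spec_keyword file (keyword file)

-- ===== LEMMAS AND PROOFS =====

-- pyGet? at the small fixed indices A uses, on a list with that many exposed heads
lemma pvG1 (a b : Char) (l : List Char) : PySem.List.pyGet? (a::b::l) 1 = some b := by
  simp [PySem.List.pyGet?, PySem.List.pyIdx?]
lemma pvG2 (a b c : Char) (l : List Char) : PySem.List.pyGet? (a::b::c::l) 2 = some c := by
  simp [PySem.List.pyGet?, PySem.List.pyIdx?]
  split
  · simp
  · omega
lemma pvG3 (a b c d : Char) (l : List Char) : PySem.List.pyGet? (a::b::c::d::l) 3 = some d := by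
  simp [PySem.List.pyGet?, PySem.List.pyIdx?]
  split
  · simp
  · omega
lemma pvG4 (a b c d e : Char) (l : List Char) : PySem.List.pyGet? (a::b::c::d::e::l) 4 = some e := by
  simp [PySem.List.pyGet?, PySem.List.pyIdx?]
  split
  · simp
  · omega

lemma pv_chars_eq (acc : List String) (l : List Char)
    (h : ∀ p ∈ pvProperPrefixes, l ≠ p.toList) :
    keywordCharsA acc l = keywordCharsB acc l := by
  rcases l with _ | ⟨c0, l⟩
  · simp [keywordCharsA, keywordCharsB, pvKeys, PySem.Chars.startswith, List.isPrefixOf,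
          PySem.List.pyGet?, PySem.List.pyIdx?]
  by_cases hi : c0 = 'i'
  · subst hi
    rcases l with _ | ⟨c1, l⟩
    · exact absurd (by decide) (h "i" (by simp [pvProperPrefixes]))
    by_cases h1 : c1 = 'n'
    · subst h1
      rcases l with _ | ⟨c2, l⟩
      · exact absurd (by decide) (h "in" (by simp [pvProperPrefixes]))
      by_cases h2 : c2 = 't'
      · subst h2
        simp only [keywordCharsA, keywordCharsB]
        generalize PySem.List.pyGet? (List.filter PySem.Chars.isalpha ('i'::'n'::'t'::l)) (-1) = g
        by_cases hg : g = some 't'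
        · simp [pvKeys, PySem.Chars.startswith, List.isPrefixOf, PySem.List.pyGet?_zero_cons,
                pvG1, pvG2, pvG3, pvG4, PySem.List.pyGet?_neg_one, hg]
        · simp [pvKeys, PySem.Chars.startswith, List.isPrefixOf, PySem.List.pyGet?_zero_cons,
                pvG1, pvG2, pvG3, pvG4, PySem.List.pyGet?_neg_one, hg]
      · simp [keywordCharsA, keywordCharsB, pvKeys, PySem.Chars.startswith, List.isPrefixOf,
              PySem.List.pyGet?_zero_cons, pvG1, pvG2, PySem.List.pyGet?_neg_one, h2, Ne.symm h2]
    · simp [keywordCharsA, keywordCharsB, pvKeys, PySem.Chars.startswith, List.isPrefixOf,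
            PySem.List.pyGet?_zero_cons, pvG1, PySem.List.pyGet?_neg_one, h1, Ne.symm h1]
  · by_cases hfc : c0 = 'f'
    · subst hfc
      rcases l with _ | ⟨c1, l⟩
      · exact absurd (by decide) (h "f" (by simp [pvProperPrefixes]))
      by_cases h1 : c1 = 'l'
      · subst h1
        rcases l with _ | ⟨c2, l⟩
        · exact absurd (by decide) (h "fl" (by simp [pvProperPrefixes]))
        by_cases h2 : c2 = 'o'
        · subst h2
          rcases l with _ | ⟨c3, l⟩
          · exact absurd (by decide) (h "flo" (by simp [pvProperPrefixes]))
          by_cases h3 : c3 = 'a'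
          · subst h3
            rcases l with _ | ⟨c4, l⟩
            · exact absurd (by decide) (h "floa" (by simp [pvProperPrefixes]))
            by_cases h4 : c4 = 't'
            · subst h4
              simp only [keywordCharsA, keywordCharsB]
              generalize PySem.List.pyGet? (List.filter PySem.Chars.isalpha ('f'::'l'::'o'::'a'::'t'::l)) (-1) = g
              by_cases hg : g = some 't'
              · simp [pvKeys, PySem.Chars.startswith, List.isPrefixOf, PySem.List.pyGet?_zero_cons,
                      pvG1, pvG2, pvG3, pvG4, PySem.List.pyGet?_neg_one, hg]
              · simp [pvKeys, PySem.Chars.startswith, List.isPrefixOf, PySem.List.pyGet?_zero_cons,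
                      pvG1, pvG2, pvG3, pvG4, PySem.List.pyGet?_neg_one, hg]
            · simp [keywordCharsA, keywordCharsB, pvKeys, PySem.Chars.startswith, List.isPrefixOf,
                    PySem.List.pyGet?_zero_cons, pvG1, pvG2, pvG3, pvG4, PySem.List.pyGet?_neg_one, h4, Ne.symm h4]
          · simp [keywordCharsA, keywordCharsB, pvKeys, PySem.Chars.startswith, List.isPrefixOf,
                  PySem.List.pyGet?_zero_cons, pvG1, pvG2, pvG3, PySem.List.pyGet?_neg_one, h3, Ne.symm h3]
        · simp [keywordCharsA, keywordCharsB, pvKeys, PySem.Chars.startswith, List.isPrefixOf,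
                PySem.List.pyGet?_zero_cons, pvG1, pvG2, PySem.List.pyGet?_neg_one, h2, Ne.symm h2]
      · simp [keywordCharsA, keywordCharsB, pvKeys, PySem.Chars.startswith, List.isPrefixOf,
              PySem.List.pyGet?_zero_cons, pvG1, PySem.List.pyGet?_neg_one, h1, Ne.symm h1]
    · by_cases hw : c0 = 'w'
      · subst hw
        rcases l with _ | ⟨c1, l⟩
        · exact absurd (by decide) (h "w" (by simp [pvProperPrefixes]))
        by_cases h1 : c1 = 'h'
        · subst h1
          rcases l with _ | ⟨c2, l⟩
          · exact absurd (by decide) (h "wh" (by simp [pvProperPrefixes]))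
          by_cases h2 : c2 = 'i'
          · subst h2
            rcases l with _ | ⟨c3, l⟩
            · exact absurd (by decide) (h "whi" (by simp [pvProperPrefixes]))
            by_cases h3 : c3 = 'l'
            · subst h3
              rcases l with _ | ⟨c4, l⟩
              · exact absurd (by decide) (h "whil" (by simp [pvProperPrefixes]))
              by_cases h4 : c4 = 'e'
              · subst h4
                simp only [keywordCharsA, keywordCharsB]
                generalize PySem.List.pyGet? (List.filter PySem.Chars.isalpha ('w'::'h'::'i'::'l'::'e'::l)) (-1) = g
                by_cases hg : g = some 'e'
                · simp [pvKeys, PySem.Chars.startswith, List.isPrefixOf, PySem.List.pyGet?_zero_cons,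
                        pvG1, pvG2, pvG3, pvG4, PySem.List.pyGet?_neg_one, hg]
                · simp [pvKeys, PySem.Chars.startswith, List.isPrefixOf, PySem.List.pyGet?_zero_cons,
                        pvG1, pvG2, pvG3, pvG4, PySem.List.pyGet?_neg_one, hg]
              · simp [keywordCharsA, keywordCharsB, pvKeys, PySem.Chars.startswith, List.isPrefixOf,
                      PySem.List.pyGet?_zero_cons, pvG1, pvG2, pvG3, pvG4, PySem.List.pyGet?_neg_one, h4, Ne.symm h4]
            · simp [keywordCharsA, keywordCharsB, pvKeys, PySem.Chars.startswith, List.isPrefixOf,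
                    PySem.List.pyGet?_zero_cons, pvG1, pvG2, pvG3, PySem.List.pyGet?_neg_one, h3, Ne.symm h3]
          · simp [keywordCharsA, keywordCharsB, pvKeys, PySem.Chars.startswith, List.isPrefixOf,
                  PySem.List.pyGet?_zero_cons, pvG1, pvG2, PySem.List.pyGet?_neg_one, h2, Ne.symm h2]
        · simp [keywordCharsA, keywordCharsB, pvKeys, PySem.Chars.startswith, List.isPrefixOf,
                PySem.List.pyGet?_zero_cons, pvG1, PySem.List.pyGet?_neg_one, h1, Ne.symm h1]
      · by_cases hm : c0 = 'm'
        · subst hm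
          rcases l with _ | ⟨c1, l⟩
          · exact absurd (by decide) (h "m" (by simp [pvProperPrefixes]))
          by_cases h1 : c1 = 'a'
          · subst h1
            rcases l with _ | ⟨c2, l⟩
            · exact absurd (by decide) (h "ma" (by simp [pvProperPrefixes]))
            by_cases h2 : c2 = 'i'
            · subst h2
              rcases l with _ | ⟨c3, l⟩
              · exact absurd (by decide) (h "mai" (by simp [pvProperPrefixes]))
              by_cases h3 : c3 = 'n'
              · subst h3
                simp only [keywordCharsA, keywordCharsB]
                generalize PySem.List.pyGet? (List.filter PySem.Chars.isalpha ('m'::'a'::'i'::'n'::l)) (-1) = g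
                by_cases hg : g = some 'n'
                · simp [pvKeys, PySem.Chars.startswith, List.isPrefixOf, PySem.List.pyGet?_zero_cons,
                        pvG1, pvG2, pvG3, pvG4, PySem.List.pyGet?_neg_one, hg]
                · simp [pvKeys, PySem.Chars.startswith, List.isPrefixOf, PySem.List.pyGet?_zero_cons,
                        pvG1, pvG2, pvG3, pvG4, PySem.List.pyGet?_neg_one, hg]
              · simp [keywordCharsA, keywordCharsB, pvKeys, PySem.Chars.startswith, List.isPrefixOf,
                      PySem.List.pyGet?_zero_cons, pvG1, pvG2, pvG3, PySem.List.pyGet?_neg_one, h3, Ne.symm h3]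
            · simp [keywordCharsA, keywordCharsB, pvKeys, PySem.Chars.startswith, List.isPrefixOf,
                    PySem.List.pyGet?_zero_cons, pvG1, pvG2, PySem.List.pyGet?_neg_one, h2, Ne.symm h2]
          · simp [keywordCharsA, keywordCharsB, pvKeys, PySem.Chars.startswith, List.isPrefixOf,
                  PySem.List.pyGet?_zero_cons, pvG1, PySem.List.pyGet?_neg_one, h1, Ne.symm h1]
        · by_cases hc : c0 = 'c'
          · subst hc
            rcases l with _ | ⟨c1, l⟩
            · exact absurd (by decide) (h "c" (by simp [pvProperPrefixes]))
            by_cases h1 : c1 = 'o'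
            · subst h1
              rcases l with _ | ⟨c2, l⟩
              · exact absurd (by decide) (h "co" (by simp [pvProperPrefixes]))
              by_cases h2 : c2 = 'n'
              · subst h2
                rcases l with _ | ⟨c3, l⟩
                · exact absurd (by decide) (h "con" (by simp [pvProperPrefixes]))
                by_cases h3 : c3 = 's'
                · subst h3
                  rcases l with _ | ⟨c4, l⟩
                  · exact absurd (by decide) (h "cons" (by simp [pvProperPrefixes]))
                  by_cases h4 : c4 = 't'
                  · subst h4
                    simp only [keywordCharsA, keywordCharsB]
                    generalize PySem.List.pyGet? (List.filter PySem.Chars.isalpha ('c'::'o'::'n'::'s'::'t'::l)) (-1) = g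
                    by_cases hg : g = some 't'
                    · simp [pvKeys, PySem.Chars.startswith, List.isPrefixOf, PySem.List.pyGet?_zero_cons,
                            pvG1, pvG2, pvG3, pvG4, PySem.List.pyGet?_neg_one, hg]
                    · simp [pvKeys, PySem.Chars.startswith, List.isPrefixOf, PySem.List.pyGet?_zero_cons,
                            pvG1, pvG2, pvG3, pvG4, PySem.List.pyGet?_neg_one, hg]
                  · simp [keywordCharsA, keywordCharsB, pvKeys, PySem.Chars.startswith, List.isPrefixOf,
                          PySem.List.pyGet?_zero_cons, pvG1, pvG2, pvG3, pvG4, PySem.List.pyGet?_neg_one, h4, Ne.symm h4]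
                · simp [keywordCharsA, keywordCharsB, pvKeys, PySem.Chars.startswith, List.isPrefixOf,
                        PySem.List.pyGet?_zero_cons, pvG1, pvG2, pvG3, PySem.List.pyGet?_neg_one, h3, Ne.symm h3]
              · simp [keywordCharsA, keywordCharsB, pvKeys, PySem.Chars.startswith, List.isPrefixOf,
                      PySem.List.pyGet?_zero_cons, pvG1, pvG2, PySem.List.pyGet?_neg_one, h2, Ne.symm h2]
            · simp [keywordCharsA, keywordCharsB, pvKeys, PySem.Chars.startswith, List.isPrefixOf,
                    PySem.List.pyGet?_zero_cons, pvG1, PySem.List.pyGet?_neg_one, h1, Ne.symm h1]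
          · simp [keywordCharsA, keywordCharsB, pvKeys, PySem.Chars.startswith, List.isPrefixOf,
                  PySem.List.pyGet?_zero_cons, PySem.List.pyGet?_neg_one,
                  hi, Ne.symm hi, hfc, Ne.symm hfc, hw, Ne.symm hw, hm, Ne.symm hm, hc, Ne.symm hc]

lemma pv_step_eq (acc : List String) (word : String) (hw : word ∉ pvProperPrefixes) :
    keywordCharsA acc word.toList = keywordCharsB acc word.toList := by
  refine pv_chars_eq acc word.toList (fun p hp he => hw ?_)
  rwa [String.toList_inj.mp he]

-- ===== VERDICT (by name: the statement is the Claim_ definition above) =====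
theorem keyword_spec : Claim_equal_keyword := by
  intro file _ hpre
  unfold Spec_keyword keyword keyword_alt
  exact PySem.List.foldl_congr_mem _ _ _ _ (fun acc w hmem => pv_step_eq acc w (hpre w hmem))
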